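-- pv_equiv track=rewrite | github.com/keeker765/CCT | src/model/fusegpt_graft.py | build_multi_absorb_map
-- ===== SOURCE A (Python) =====
-- from typing import Dict, List
--
-- def build_multi_absorb_map(
--     column_layers: List[int],
--     num_base_layers: int,
--     front_layers: List[int],
--     back_layers: List[int],
-- ) -> Dict[int, List[int]]:
--     """计算多 donor 吸收映射
--
--     每个 column 层吸收其与下一个 used 层之间的所有未使用层.
--     Example:
--       used = [0,1, 2,7,12, 14,15]
--       column[2]  → [3,4,5,6]
--       column[7]  → [8,9,10,11]
--       column[12] → [13]
--     """
--     used = set(front_layers + column_layers + back_layers)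
--     all_used_sorted = sorted(used)
--
--     absorb_map: Dict[int, List[int]] = {}
--     for col_idx in column_layers:
--         next_used = num_base_layers
--         for u in all_used_sorted:
--             if u > col_idx:
--                 next_used = u
--                 break
--         donors = [i for i in range(col_idx + 1, next_used) if i not in used]
--         if donors:
--             absorb_map[col_idx] = donors
--
--     return absorb_map
-- ===== SOURCE B (Python) =====
-- def build_multi_absorb_map(column_layers, num_base_layers, front_layers, back_layers):
--     used = sorted(set(front_layers + column_layers + back_layers))
--     # one pass: the next used layer after each used layer (num_base_layers after the last)
--     nxt = dict(zip(used, used[1:] + [num_base_layers]))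
--     result = {}
--     for col in column_layers:
--         v = nxt.get(col, num_base_layers)  # col is itself used, so it is always a key of nxt
--         if v > col + 1:
--             result[col] = list(range(col + 1, v))
--     return result
-- ===== Notes on version B (the rewrite author's own statement) =====
-- stated objective: faster
-- what changed: Replaces the per-column linear scan for the next used layer and the per-donor set-membership filter by a single pass over the sorted used list that records each inter-used gap in a dictionary, then one lookup per column (the membership filter is provably always true).
import Mathlib
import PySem

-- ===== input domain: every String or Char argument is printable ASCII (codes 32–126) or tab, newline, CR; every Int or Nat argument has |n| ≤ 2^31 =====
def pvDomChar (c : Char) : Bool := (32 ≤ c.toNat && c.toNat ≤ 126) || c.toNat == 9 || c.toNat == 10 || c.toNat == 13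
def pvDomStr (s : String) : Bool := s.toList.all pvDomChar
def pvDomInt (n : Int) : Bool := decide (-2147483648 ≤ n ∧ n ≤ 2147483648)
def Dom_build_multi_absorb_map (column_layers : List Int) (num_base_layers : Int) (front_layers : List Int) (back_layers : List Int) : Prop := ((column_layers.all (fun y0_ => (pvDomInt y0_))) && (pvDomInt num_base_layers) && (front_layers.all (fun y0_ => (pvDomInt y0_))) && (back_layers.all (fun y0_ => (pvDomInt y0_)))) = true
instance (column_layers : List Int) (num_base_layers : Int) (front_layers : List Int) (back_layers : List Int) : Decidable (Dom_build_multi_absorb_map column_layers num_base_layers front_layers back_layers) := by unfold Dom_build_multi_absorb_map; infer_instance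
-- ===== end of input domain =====

-- B replaces A's per-column scan for the next used layer and the per-donor membership filter
-- by one pass over the sorted used list building a gap dictionary, then one lookup per column (faster).

-- ===== PORT A =====
-- A's inner loop: next_used = num_base_layers; for u in all_used_sorted: if u > col_idx: next_used = u; break
def pvNextUsed (s : List Int) (col nb : Int) : Int :=
  match s with
  | [] => nb
  | u :: rest => if u > col then u else pvNextUsed rest col nb

def build_multi_absorb_map (column_layers : List Int) (num_base_layers : Int) (front_layers : List Int) (back_layers : List Int) : List (Int × List Int) :=
  let used : PySem.Set Int := PySem.Set.ofList (front_layers ++ column_layers ++ back_layers)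
  let all_used_sorted := PySem.List.sorted used (fun x => x) false
  let absorb_map := column_layers.foldl (fun d col_idx =>
      let next_used := pvNextUsed all_used_sorted col_idx num_base_layers
      let donors := (PySem.List.pyRange (col_idx + 1) next_used 1).filter
        (fun i => !(PySem.Set.contains used i))
      if donors.isEmpty then d else d.insert col_idx donors) PySem.Dict.empty
  absorb_map.items

-- ===== PORT B =====
def build_multi_absorb_map_alt (column_layers : List Int) (num_base_layers : Int) (front_layers : List Int) (back_layers : List Int) : List (Int × List Int) :=
  let used := PySem.List.sorted (PySem.Set.ofList (front_layers ++ column_layers ++ back_layers)) (fun x => x) false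
  -- used[1:] is List.drop 1 (exact: the slice index is the nonnegative literal 1)
  let nxt : PySem.Dict Int Int := PySem.Dict.ofList (used.zip (used.drop 1 ++ [num_base_layers]))
  let result := column_layers.foldl (fun r col =>
      let v := nxt.getD col num_base_layers
      if v > col + 1 then r.insert col (PySem.List.pyRange (col + 1) v 1) else r) PySem.Dict.empty
  result.items

-- ===== PRECONDITION & SPEC =====
def Spec_build_multi_absorb_map (column_layers : List Int) (num_base_layers : Int) (front_layers : List Int) (back_layers : List Int) (out : List (Int × List Int)) : Prop := out = build_multi_absorb_map_alt column_layers num_base_layers front_layers back_layers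
instance (column_layers : List Int) (num_base_layers : Int) (front_layers : List Int) (back_layers : List Int) (out : List (Int × List Int)) : Decidable (Spec_build_multi_absorb_map column_layers num_base_layers front_layers back_layers out) := by unfold Spec_build_multi_absorb_map; infer_instance

-- ===== CLAIM (what is proved, stated in full; the proofs are below) =====
def Claim_equal_build_multi_absorb_map : Prop := ∀ (column_layers : List Int) (num_base_layers : Int) (front_layers : List Int) (back_layers : List Int), Dom_build_multi_absorb_map column_layers num_base_layers front_layers back_layers → Spec_build_multi_absorb_map column_layers num_base_layers front_layers back_layers (build_multi_absorb_map column_layers num_base_layers front_layers back_layers)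

-- ===== LEMMAS AND PROOFS =====

-- Every element of a list is ≤ col or ≥ the next used layer found by A's scan.
theorem pvNextUsed_le_or (s : List Int) (col nb : Int) (hs : s.Pairwise (· < ·)) :
    ∀ y ∈ s, y ≤ col ∨ pvNextUsed s col nb ≤ y := by
  induction s with
  | nil => intro y hy; cases hy
  | cons u rest ih =>
    intro y hy
    rcases List.mem_cons.mp hy with h | h
    · subst h
      by_cases hu : y > col
      · right; simp [pvNextUsed, hu]
      · left; omega
    · by_cases hu : u > col
      · right
        simp only [pvNextUsed, if_pos hu]
        exact le_of_lt ((List.pairwise_cons.mp hs).1 y h)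
      · have := ih (List.pairwise_cons.mp hs).2 y h
        simpa [pvNextUsed, hu] using this

-- a fold of inserts never touches a key none of the pairs carries
theorem pvNxt_get?_not_mem (l : List (Int × Int)) (g : PySem.Dict Int Int) (k : Int)
    (h : ∀ p ∈ l, p.1 ≠ k) :
    (l.foldl (fun d p => d.insert p.1 p.2) g).get? k = g.get? k := by
  induction l generalizing g with
  | nil => rfl
  | cons p rest ih =>
    simp only [List.foldl_cons]
    rw [ih _ (fun q hq => h q (List.mem_cons_of_mem _ hq)),
      PySem.Dict.get?_insert_of_ne _ _ (h p List.mem_cons_self).symm]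

-- B's next-used dictionary lookup, characterized by A's next-used scan.
theorem pvNxt_get? (s : List Int) (nb : Int) (g : PySem.Dict Int Int)
    (hs : s.Pairwise (· < ·)) (col : Int) (hcol : col ∈ s) :
    ((s.zip (s.drop 1 ++ [nb])).foldl (fun d p => d.insert p.1 p.2) g).get? col
      = some (pvNextUsed s col nb) := by
  induction s generalizing g with
  | nil => cases hcol
  | cons u rest ih =>
    have hrest_pw : rest.Pairwise (· < ·) := (List.pairwise_cons.mp hs).2
    have hlt : ∀ y ∈ rest, u < y := (List.pairwise_cons.mp hs).1
    have hzip : (u :: rest).zip ((u :: rest).drop 1 ++ [nb])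
        = (u, rest.headD nb) :: rest.zip (rest.drop 1 ++ [nb]) := by
      cases rest with
      | nil => rfl
      | cons w r => rfl
    rw [hzip]
    simp only [List.foldl_cons]
    rcases List.mem_cons.mp hcol with h | h
    · subst h
      have hn : pvNextUsed (col :: rest) col nb = rest.headD nb := by
        cases rest with
        | nil => simp [pvNextUsed]
        | cons w r =>
          have hw : w > col := hlt w List.mem_cons_self
          simp [pvNextUsed, hw]
      have hnotin : ∀ p ∈ rest.zip (rest.drop 1 ++ [nb]), p.1 ≠ col := by
        intro p hp
        obtain ⟨a, b⟩ := p
        have : a ∈ rest := (List.of_mem_zip hp).1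
        exact ne_of_gt (hlt _ this)
      rw [pvNxt_get?_not_mem _ _ _ hnotin, hn, PySem.Dict.get?_insert_self]
    · have hu : ¬ (u > col) := not_lt.mpr (le_of_lt (hlt col h))
      have hn : pvNextUsed (u :: rest) col nb = pvNextUsed rest col nb := by
        simp [pvNextUsed, hu]
      rw [hn]
      exact ih _ hrest_pw h

-- ===== VERDICT (by name: the statement is the Claim_ definition above) =====
theorem build_multi_absorb_map_spec : Claim_equal_build_multi_absorb_map := by
  intro cl nb fl bl _
  unfold Spec_build_multi_absorb_map build_multi_absorb_map build_multi_absorb_map_alt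
  dsimp only
  set used : PySem.Set Int := PySem.Set.ofList (fl ++ cl ++ bl) with hused
  set s := PySem.List.sorted used (fun x => x) false with hs_def
  have hs_pw : s.Pairwise (· < ·) := PySem.List.sorted_ofList_pairwise_lt (fl ++ cl ++ bl)
  have hs_mem : ∀ x : Int, x ∈ s ↔ x ∈ used := by
    intro x; rw [hs_def, PySem.List.mem_sorted]
  congr 1
  apply PySem.List.foldl_congr_mem
  intro d col hcol
  have hcol_used : col ∈ used := by
    rw [hused, PySem.Set.mem_ofList]
    simp [hcol]
  have hcol_s : col ∈ s := (hs_mem col).mpr hcol_used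
  set n := pvNextUsed s col nb with hn_def
  -- the filter removes nothing
  have hfilter : (PySem.List.pyRange (col + 1) n 1).filter (fun i => !(PySem.Set.contains used i))
      = PySem.List.pyRange (col + 1) n 1 := by
    apply List.filter_eq_self.mpr
    intro i hi
    have hb := (PySem.List.mem_pyRange_one).mp hi
    have : i ∉ s := by
      intro hmem
      rcases pvNextUsed_le_or s col nb hs_pw i hmem with h | h <;> omega
    have : i ∉ used := fun hu => this ((hs_mem i).mpr hu)
    have hnotapp : i ∉ fl ++ cl ++ bl := fun hmem => this ((PySem.Set.mem_ofList _ _).mpr hmem)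
    simp only [List.mem_append, not_or] at hnotapp
    simp [*]
  rw [hfilter]
  have hget : (PySem.Dict.ofList (s.zip (s.drop 1 ++ [nb]))).get? col = some n :=
    pvNxt_get? s nb PySem.Dict.empty hs_pw col hcol_s
  have hgetD : (PySem.Dict.ofList (s.zip (s.drop 1 ++ [nb]))).getD col nb = n := by
    rw [PySem.Dict.getD_eq_get?_getD, hget]; rfl
  rw [hgetD]
  by_cases hc : n > col + 1
  · have hne : PySem.List.pyRange (col + 1) n 1 ≠ [] := by
      rw [PySem.List.pyRange_one_cons (by omega)]; simp
    rw [if_neg (by simpa [List.isEmpty_iff] using hne), if_pos hc]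
  · have hnil : PySem.List.pyRange (col + 1) n 1 = [] :=
      PySem.List.pyRange_one_eq_nil (by omega)
    rw [if_pos (by simp [hnil]), if_neg hc]
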